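-- pv_equiv track=rewrite | github.com/optionalg/cracking_the_coding_interview_python-1 | ch8_recursion_and_dynamic_programming/8.7_permutations_without_dups.py | perms_with_dups
-- ===== SOURCE A (Python) =====
-- def perms_with_dups(s):
--     if len(s) == 1:
--         return [s]
--
--     result = []
--     for char_index in range(len(s)):
--         active_char = s[char_index]
--         remaining = s[:char_index] + s[char_index+1:]
--         remaining_perms = perms_with_dups(remaining)
--         perms = [active_char + perm for perm in remaining_perms]
--         result.extend(perms)
--
--     return result
-- ===== SOURCE B (Python) =====
-- def perms_with_dups(s):
--     # Iterative breadth-first expansion: each level extends every (prefix, rest)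
--     # pair by moving one character of rest to the prefix, preserving index order.
--     level = [("", s)]
--     for _ in range(len(s)):
--         level = [(p + r[i], r[:i] + r[i + 1:])
--                  for (p, r) in level
--                  for i in range(len(r))]
--     return [p for (p, _) in level]
-- ===== Notes on version B (the rewrite author's own statement) =====
-- stated objective: alternative
-- what changed: Replaces the recursive head-selection (pick s[i], recurse on the rest, prepend) by an iterative breadth-first level expansion over (prefix, rest) pairs that produces the same index-lexicographic order without recursion.
-- intended difference: On the empty string A returns [] (its base case is len==1 so the loop never runs), while B returns [''], the one permutation of the empty string, which is the intended value. — e.g. on perms_with_dups(""): A returns [], B returns [""]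
import Mathlib
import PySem

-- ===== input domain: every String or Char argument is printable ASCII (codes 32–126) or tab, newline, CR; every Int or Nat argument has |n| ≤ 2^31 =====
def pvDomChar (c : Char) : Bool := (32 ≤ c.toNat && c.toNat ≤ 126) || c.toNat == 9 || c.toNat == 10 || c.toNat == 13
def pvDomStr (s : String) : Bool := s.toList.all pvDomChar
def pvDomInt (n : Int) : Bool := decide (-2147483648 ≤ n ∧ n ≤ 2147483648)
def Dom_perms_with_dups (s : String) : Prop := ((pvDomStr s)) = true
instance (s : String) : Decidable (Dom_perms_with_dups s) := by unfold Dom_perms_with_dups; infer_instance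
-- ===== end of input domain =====

-- B replaces A's recursive head-selection by an iterative breadth-first level
-- expansion over (prefix, rest) pairs (same order, same cost); on "" A returns []
-- while B returns [""], the intended one permutation of the empty string.

-- ===== PORT A =====
-- fuel = length of the string; it only makes the recursion structural and is
-- never exhausted on the paths Python takes (fuel = l.length at every call).
def permsAF : Nat → List Char → List (List Char)
  | 0, _ => []
  | fuel + 1, l =>
    if l.length = 1 then [l]
    else
      (List.range l.length).foldl
        (fun result char_index =>
          let active_char := l.getD char_index ' '
          let remaining := l.take char_index ++ l.drop (char_index + 1)
          let remaining_perms := permsAF fuel remaining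
          let perms := remaining_perms.map (fun perm => active_char :: perm)
          result ++ perms)
        []

def perms_with_dups (s : String) : List String :=
  (permsAF s.toList.length s.toList).map (fun cs => String.ofList cs)

-- ===== PORT B =====
-- level = [(p + r[i], r[:i] + r[i+1:]) for (p, r) in level for i in range(len(r))]
def pvExpand (lv : List (List Char × List Char)) : List (List Char × List Char) :=
  lv.flatMap (fun pr =>
    (List.range pr.2.length).map (fun i =>
      (pr.1 ++ [pr.2.getD i ' '], pr.2.take i ++ pr.2.drop (i + 1))))

-- 'for _ in range(len(s))' as a counted loop
def pvLoopB : Nat → List (List Char × List Char) → List (List Char × List Char)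
  | 0, lv => lv
  | n + 1, lv => pvLoopB n (pvExpand lv)

def perms_with_dups_alt (s : String) : List String :=
  (pvLoopB s.toList.length [([], s.toList)]).map (fun pr => String.ofList pr.1)

-- ===== PRECONDITION & SPEC =====
-- On the empty string A returns [] (its base case is len==1, so the loop never
-- runs), while B returns [""], the one permutation of the empty string, which
-- is the intended value.
def D_perms_with_dups (s : String) : Prop := s = ""
instance (s : String) : Decidable (D_perms_with_dups s) := by unfold D_perms_with_dups; infer_instance

def Spec_perms_with_dups (s : String) (out : List String) : Prop :=
  ¬ D_perms_with_dups s → out = perms_with_dups_alt s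
instance (s : String) (out : List String) : Decidable (Spec_perms_with_dups s out) := by
  unfold Spec_perms_with_dups; infer_instance

def pvDiffWitness_perms_with_dups : String := ""
def pvDiffWitnessOut_perms_with_dups : (List String) × (List String) := ([], [""])

-- ===== CLAIM (what is proved, stated in full; the proofs are below) =====
def Claim_unchanged_perms_with_dups : Prop :=
  ∀ (s : String), Dom_perms_with_dups s → Spec_perms_with_dups s (perms_with_dups s)
def Claim_changed_perms_with_dups : Prop :=
  Dom_perms_with_dups (pvDiffWitness_perms_with_dups) ∧
  D_perms_with_dups (pvDiffWitness_perms_with_dups) ∧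
  perms_with_dups (pvDiffWitness_perms_with_dups) = pvDiffWitnessOut_perms_with_dups.1 ∧
  perms_with_dups_alt (pvDiffWitness_perms_with_dups) = pvDiffWitnessOut_perms_with_dups.2 ∧
  pvDiffWitnessOut_perms_with_dups.1 ≠ pvDiffWitnessOut_perms_with_dups.2
def Claim_exact_perms_with_dups : Prop :=
  ∀ (s : String), Dom_perms_with_dups s → D_perms_with_dups s →
    perms_with_dups s ≠ perms_with_dups_alt s

-- ===== LEMMAS AND PROOFS =====

lemma pv_flatMap_congr {α β : Type} {l : List α} {f g : α → List β}
    (h : ∀ a ∈ l, f a = g a) : l.flatMap f = l.flatMap g := by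
  induction l with
  | nil => rfl
  | cons a l ih =>
    simp only [List.flatMap_cons, h a (by simp), ih (fun a ha => h a (by simp [ha]))]

lemma pv_expand_len {n : Nat} {L : List (List Char × List Char)}
    (h : ∀ pr ∈ L, pr.2.length = n + 1) :
    ∀ pr ∈ pvExpand L, pr.2.length = n := by
  intro pr hpr
  simp only [pvExpand, List.mem_flatMap, List.mem_map, List.mem_range] at hpr
  obtain ⟨q, hq, i, hi, rfl⟩ := hpr
  have := h q hq
  simp only [List.length_append, List.length_take, List.length_drop]
  omega

-- A's extend-loop as a flatMap, for strings of length ≥ 2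
lemma pv_A_unfold {fuel : Nat} {l : List Char} (h : l.length ≠ 1) :
    permsAF (fuel + 1) l =
      (List.range l.length).flatMap (fun i =>
        (permsAF fuel (l.take i ++ l.drop (i + 1))).map
          (fun perm => (l.getD i ' ') :: perm)) := by
  simp only [permsAF, if_neg h]
  rw [PySem.List.foldl_append_eq_flatMap]
  simp

-- loop invariant: expanding n+1 times a level whose rests all have length n+1
-- yields exactly A's permutations of each rest, appended to its prefix
lemma pv_key : ∀ (n : Nat) (L : List (List Char × List Char)),
    (∀ pr ∈ L, pr.2.length = n + 1) →
    (pvLoopB (n + 1) L).map Prod.fst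
      = L.flatMap (fun pr => (permsAF (n + 1) pr.2).map (fun q => pr.1 ++ q)) := by
  intro n
  induction n with
  | zero =>
    intro L h
    show (pvLoopB 0 (pvExpand L)).map Prod.fst = _
    simp only [pvLoopB, pvExpand, List.map_flatMap, List.map_map]
    refine pv_flatMap_congr (fun pr hpr => ?_)
    obtain ⟨c, hc⟩ := List.length_eq_one_iff.mp (h pr hpr)
    simp [hc, permsAF]
  | succ n ih =>
    intro L h
    show (pvLoopB (n + 1) (pvExpand L)).map Prod.fst = _
    rw [ih (pvExpand L) (pv_expand_len h)]
    simp only [pvExpand, List.flatMap_assoc, List.flatMap_map]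
    refine pv_flatMap_congr (fun pr hpr => ?_)
    have hlen : pr.2.length = n + 2 := h pr hpr
    rw [pv_A_unfold (by omega)]
    simp [List.map_flatMap, List.map_map, Function.comp_def]

lemma pv_toList_ne_nil {s : String} (h : s ≠ "") : s.toList ≠ [] := by
  intro hn
  apply h
  have : s.toList = ("" : String).toList := by simpa using hn
  exact String.toList_inj.mp this

-- ===== VERDICT (by name: the statement is the Claim_ definition above) =====
theorem perms_with_dups_spec : Claim_unchanged_perms_with_dups := by
  intro s _ hD
  unfold perms_with_dups perms_with_dups_alt
  have hne : s.toList ≠ [] := pv_toList_ne_nil hD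
  obtain ⟨n, hn⟩ : ∃ n, s.toList.length = n + 1 := by
    cases h : s.toList with
    | nil => exact absurd h hne
    | cons a t => exact ⟨t.length, rfl⟩
  have := pv_key n [([], s.toList)] (by simpa using hn)
  rw [hn, show (fun pr : List Char × List Char => String.ofList pr.1)
        = (fun cs => String.ofList cs) ∘ Prod.fst from rfl,
      ← List.map_map, this]
  simp

theorem perms_with_dups_changed : Claim_changed_perms_with_dups := by
  unfold Claim_changed_perms_with_dups; decide

theorem perms_with_dups_tight : Claim_exact_perms_with_dups := by
  intro s _ hD
  subst hD
  decide
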